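-- pv_equiv track=rewrite | github.com/wurthless-elektroniks/clock | src/wurthless/clock/webserver/webserver.py | validateWifiAccessPointName
-- ===== SOURCE A (Python) =====
-- def validateWifiAccessPointName(string):
--     l = list(string)
--     if ( 2 <= len(l) and len(l) <= 32) is False:
--         return False
--
--     # also catches precisely one leading space
--     if l[0] in [ '\u0021',  '\u0023',  '\u003B', '\u0020' ]:
--         return False
--
--     for i in l:
--         if (i == '\u0020' or \
--              i == '\u0021' or \
--              i == '\u0023' or \
--              ('\u0025' <= i and i <= '\u002A') or \
--              ('\u002C' <= i and i <= '\u003E') or \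
--              ('\u0040' <= i and i <= '\u005A') or \
--              ('\u005E' <= i and i <= '\u007E')) is False:
--             return False
--
--     # catch trailing space
--     if l[len(l)-1] == '\u0020':
--         return False
--
--     return True
-- ===== SOURCE B (Python) =====
-- def validateWifiAccessPointName(string):
--     if not 2 <= len(string) <= 32:
--         return False
--     return _scan(list(string), True)
--
-- def _scan(cs, first):
--     c = cs[0]
--     # complement test: reject anything outside printable ASCII or one of the
--     # seven printable characters the AP name may never contain
--     if c < ' ' or c > '~' or c in '"$+?[\\]':
--         return False
--     if first and c in ' !#;':
--         return False
--     if len(cs) == 1: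
--         return c != ' '
--     return _scan(cs[1:], False)
-- ===== Notes on version B (the rewrite author's own statement) =====
-- stated objective: alternative
-- what changed: Replaces A's staged guards plus range-comparison loop by one recursive pass over the characters that uses complement logic (rejecting the seven forbidden printable characters and non-printables), carrying a first-character flag and deciding the trailing-space rule when the last character is reached.
import Mathlib
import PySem

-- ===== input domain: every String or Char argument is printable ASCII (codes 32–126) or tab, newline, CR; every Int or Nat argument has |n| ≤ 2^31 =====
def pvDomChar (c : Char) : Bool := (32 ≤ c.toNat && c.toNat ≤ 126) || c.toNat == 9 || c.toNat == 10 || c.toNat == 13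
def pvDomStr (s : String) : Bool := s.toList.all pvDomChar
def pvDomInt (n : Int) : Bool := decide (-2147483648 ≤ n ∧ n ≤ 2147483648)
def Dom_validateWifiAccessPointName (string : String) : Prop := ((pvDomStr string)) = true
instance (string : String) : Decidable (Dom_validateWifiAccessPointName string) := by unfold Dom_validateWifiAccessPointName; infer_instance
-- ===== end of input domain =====

-- B replaces A's staged guards + allowed-range loop by one recursive pass with
-- complement (forbidden-character) logic and a first-character flag (objective:
-- alternative; same O(n) cost).

-- ===== PORT A =====
-- the big per-character condition of A's loop
def pvACond (i : Char) : Bool :=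
  i == ' ' || i == '!' || i == '#' ||
  ('%' ≤ i && i ≤ '*') || (',' ≤ i && i ≤ '>') ||
  ('@' ≤ i && i ≤ 'Z') || ('^' ≤ i && i ≤ '~')

-- 'for i in l: if cond(i) is False: return False'
def pvALoop : List Char → Bool
  | [] => true
  | i :: rest => if pvACond i = false then false else pvALoop rest

def validateWifiAccessPointName (string : String) : Bool :=
  let l := string.toList
  if ¬ (2 ≤ l.length ∧ l.length ≤ 32) then false
  else
    match PySem.List.pyGet? l 0 with      -- l[0]; in range here since len ≥ 2
    | none => false
    | some c0 =>
      if ['!', '#', ';', ' '].contains c0 then false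
      else if pvALoop l = false then false
      else
        match PySem.List.pyGet? l ((l.length : Int) - 1) with  -- l[len(l)-1]
        | none => false
        | some cl => if cl == ' ' then false else true

-- ===== PORT B =====
-- Source B's _scan: one recursive pass; cs[0] of a nonempty list is its head
-- (the empty case cannot occur: _scan starts on a list of length ≥ 2 and
-- stops when len(cs) == 1; Python would raise IndexError there)
def pvScan : List Char → Bool → Bool
  | [], _ => false
  | c :: rest, first =>
    if c < ' ' || '~' < c || ("\"$+?[\\]".toList).contains c then false
    else if first && ((" !#;".toList).contains c) then false
    else match rest with
      | [] => c != ' '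
      | _ :: _ => pvScan rest false      -- cs[1:]

def validateWifiAccessPointName_alt (string : String) : Bool :=
  if ¬ (2 ≤ PySem.Str.len string ∧ PySem.Str.len string ≤ 32) then false
  else pvScan string.toList true

-- ===== PRECONDITION & SPEC =====
def Spec_validateWifiAccessPointName (string : String) (out : Bool) : Prop := out = validateWifiAccessPointName_alt string
instance (string : String) (out : Bool) : Decidable (Spec_validateWifiAccessPointName string out) := by unfold Spec_validateWifiAccessPointName; infer_instance

-- ===== CLAIM (what is proved, stated in full; the proofs are below) =====
def Claim_equal_validateWifiAccessPointName : Prop := ∀ (string : String), Dom_validateWifiAccessPointName string → Spec_validateWifiAccessPointName string (validateWifiAccessPointName string)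

-- ===== LEMMAS AND PROOFS =====

-- B's per-character acceptance condition (negation of its rejection test)
def pvBOk (c : Char) : Bool :=
  !(c < ' ' || '~' < c || ("\"$+?[\\]".toList).contains c)

theorem pvALoop_eq_all (l : List Char) : pvALoop l = l.all pvACond := by
  induction l with
  | nil => rfl
  | cons i rest ih =>
    by_cases h : pvACond i = false <;> simp [pvALoop, h, ih]

set_option maxRecDepth 20000 in
theorem pvChar128 : ∀ n : Fin 128,
    pvACond (Char.ofNat n.val) = pvBOk (Char.ofNat n.val) := by decide

theorem pvChar_eq (c : Char) (h : pvDomChar c = true) : pvACond c = pvBOk c := by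
  have hlt : c.toNat < 128 := by
    simp [pvDomChar] at h; omega
  simpa [Char.ofNat_toNat] using pvChar128 ⟨c.toNat, hlt⟩

set_option maxRecDepth 2000 in
theorem pvGuard_eq (c : Char) :
    (['!', '#', ';', ' '].contains c) = ((" !#;".toList).contains c) := by
  have hs : (" !#;".toList) = [' ', '!', '#', ';'] := by decide
  rw [hs]
  by_cases h1 : c = '!' <;> by_cases h2 : c = '#' <;>
    by_cases h3 : c = ';' <;> by_cases h4 : c = ' ' <;>
    simp [h1, h2, h3, h4]

-- the first-character flag factors out of the scan
theorem pvScan_first (c : Char) (rest : List Char) :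
    pvScan (c :: rest) true
      = (!((" !#;".toList).contains c) && pvScan (c :: rest) false) := by
  by_cases hb : (c < ' ' || '~' < c || ("\"$+?[\\]".toList).contains c) = true
  · show (if _ then _ else _) = (_ && (if _ then _ else _))
    rw [if_pos hb, if_pos hb, Bool.and_false]
  · show (if _ then _ else _) = (_ && (if _ then _ else _))
    rw [if_neg hb, if_neg hb, Bool.false_and]
    by_cases hf : ((" !#;".toList).contains c) = true
    · rw [Bool.true_and, if_pos hf, hf, Bool.not_true, Bool.false_and]
    · have hff : ((" !#;".toList).contains c) = false := by simpa using hf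
      rw [Bool.true_and, if_neg hf, hff, Bool.not_false, Bool.true_and]
      rw [if_neg (by simp : ¬ (false = true))]

theorem pvScan_cons2 (c d : Char) (t : List Char) :
    pvScan (c :: d :: t) false = (pvBOk c && pvScan (d :: t) false) := by
  by_cases hb : (c < ' ' || '~' < c || ("\"$+?[\\]".toList).contains c) = true
  · have h1 : pvBOk c = false := by unfold pvBOk; rw [hb]; rfl
    show (if _ then _ else _) = _
    rw [if_pos hb, h1, Bool.false_and]
  · have hbf : (c < ' ' || '~' < c || ("\"$+?[\\]".toList).contains c) = false := by
      simpa using hb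
    have h1 : pvBOk c = true := by unfold pvBOk; rw [hbf]; rfl
    show (if _ then _ else _) = _
    rw [if_neg hb, Bool.false_and, if_neg (by simp : ¬ (false = true)), h1, Bool.true_and]

theorem pvScan_false (l : List Char) (h : l ≠ []) :
    pvScan l false = (l.all pvBOk && !(l.getLast h == ' ')) := by
  induction l with
  | nil => exact absurd rfl h
  | cons c rest ih =>
    cases rest with
    | nil =>
      by_cases hb : (c < ' ' || '~' < c || ("\"$+?[\\]".toList).contains c) = true
      · have h1 : pvBOk c = false := by unfold pvBOk; rw [hb]; rfl
        show (if _ then _ else _) = _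
        rw [if_pos hb]
        simp [h1]
      · have hbf : (c < ' ' || '~' < c || ("\"$+?[\\]".toList).contains c) = false := by
          simpa using hb
        have h1 : pvBOk c = true := by unfold pvBOk; rw [hbf]; rfl
        show (if _ then _ else _) = _
        rw [if_neg hb, Bool.false_and, if_neg (by simp : ¬ (false = true))]
        simp [h1, bne]
    | cons d t =>
      rw [pvScan_cons2, ih (show d :: t ≠ [] by simp),
        List.getLast_cons (show d :: t ≠ [] by simp)]
      simp [List.all_cons, Bool.and_assoc]

theorem validateWifiAccessPointName_spec' (string : String)
    (hdom : Dom_validateWifiAccessPointName string) :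
    validateWifiAccessPointName string = validateWifiAccessPointName_alt string := by
  unfold validateWifiAccessPointName validateWifiAccessPointName_alt
  unfold Dom_validateWifiAccessPointName pvDomStr at hdom
  rw [PySem.Str.len_eq string]
  cases hL : string.toList with
  | nil => simp
  | cons c0 rest =>
    rw [hL] at hdom
    by_cases h1 : 2 ≤ (c0 :: rest).length ∧ (c0 :: rest).length ≤ 32
    case neg =>
      have h2 : ¬ (2 ≤ ((c0 :: rest).length : Int) ∧ ((c0 :: rest).length : Int) ≤ 32) := by
        exact_mod_cast h1
      rw [if_pos h1, if_pos h2]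
    case pos =>
      have h2 : 2 ≤ ((c0 :: rest).length : Int) ∧ ((c0 :: rest).length : Int) ≤ 32 := by
        exact_mod_cast h1
      rw [if_neg (not_not_intro h1), if_neg (not_not_intro h2)]
      have hne : c0 :: rest ≠ [] := by simp
      have hA0 : PySem.List.pyGet? (c0 :: rest) 0 = some c0 :=
        PySem.List.pyGet?_zero_cons c0 rest
      have hAl : PySem.List.pyGet? (c0 :: rest) (((c0 :: rest).length : Int) - 1)
          = some ((c0 :: rest).getLast hne) := by
        have hcast : (((c0 :: rest).length : Int) - 1)
            = (((c0 :: rest).length - 1 : Nat) : Int) := by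
          have : 0 < (c0 :: rest).length := by simp
          omega
        rw [hcast, PySem.List.pyGet?_natCast, ← List.getLast?_eq_getElem?,
          List.getLast?_eq_some_getLast hne]
      simp only [hA0, hAl]
      rw [pvScan_first c0 rest, pvScan_false (c0 :: rest) hne, pvALoop_eq_all, ← pvGuard_eq c0]
      have hmem : ∀ x ∈ c0 :: rest, pvACond x = pvBOk x :=
        fun x hx => pvChar_eq x ((List.all_eq_true.mp hdom) x hx)
      have hall : (c0 :: rest).all pvACond = (c0 :: rest).all pvBOk := by
        by_cases hA : (c0 :: rest).all pvACond = true
        · have hB : (c0 :: rest).all pvBOk = true := by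
            rw [List.all_eq_true] at hA ⊢
            exact fun x hx => (hmem x hx) ▸ hA x hx
          rw [hA, hB]
        · have hA' : (c0 :: rest).all pvACond = false := by simpa using hA
          have hB : (c0 :: rest).all pvBOk = false := by
            rw [Bool.eq_false_iff]
            intro hB
            apply hA
            rw [List.all_eq_true] at hB ⊢
            exact fun x hx => (hmem x hx).symm ▸ hB x hx
          rw [hA', hB]
      by_cases hc : (['!', '#', ';', ' '].contains c0) = true
      · rw [if_pos hc, hc]; simp
      · have hcf : (['!', '#', ';', ' '].contains c0) = false := by simpa using hc
        rw [if_neg hc, hcf]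
        simp only [Bool.not_false, Bool.true_and]
        by_cases ha : (c0 :: rest).all pvACond = false
        · rw [if_pos ha]
          have hb' : (c0 :: rest).all pvBOk = false := by rw [← hall, ha]
          rw [hb', Bool.false_and]
        · have ha' : (c0 :: rest).all pvACond = true := by simpa using ha
          rw [if_neg ha]
          have hb' : (c0 :: rest).all pvBOk = true := by rw [← hall, ha']
          rw [hb', Bool.true_and]
          by_cases hsp : ((c0 :: rest).getLast hne == ' ') = true
          · rw [if_pos hsp, hsp]; simp
          · have hspf : ((c0 :: rest).getLast hne == ' ') = false := by simpa using hsp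
            rw [if_neg hsp, hspf]
            simp

-- ===== VERDICT (by name: the statement is the Claim_ definition above) =====
theorem validateWifiAccessPointName_spec : Claim_equal_validateWifiAccessPointName := by
  intro string hdom
  unfold Spec_validateWifiAccessPointName
  exact validateWifiAccessPointName_spec' string hdom
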